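-- pv_equiv track=rewrite | github.com/OngMinXian/zb4171-kazoo | docker_images/rnaseq_analysis/makesamplesheet.py | extract_files_with_keywords
-- ===== SOURCE A (Python) =====
-- def extract_files_with_keywords(file_paths):
--     file1, file2 = None, None
--
--     for file_path in file_paths:
--         if "r1.fastq.gz" in file_path.lower():
--             file1 = file_path
--         elif "r2.fastq.gz" in file_path.lower():
--             file2 = file_path
--
--     return file1, file2
-- ===== SOURCE B (Python) =====
-- def extract_files_with_keywords(file_paths):
--     # Scan from the end and keep the first hit for each slot, breaking early.
--     file1, file2 = None, None
--     for file_path in reversed(file_paths):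
--         low = file_path.lower()
--         if "r1.fastq.gz" in low:
--             if file1 is None:
--                 file1 = file_path
--         elif "r2.fastq.gz" in low:
--             if file2 is None:
--                 file2 = file_path
--         if file1 is not None and file2 is not None:
--             break
--     return file1, file2
-- ===== Notes on version B (the rewrite author's own statement) =====
-- stated objective: alternative
-- what changed: B scans the list backwards with reversed(), fills each slot only on its first (i.e. last-in-original) hit, and breaks as soon as both slots are filled, instead of A's full forward pass that keeps overwriting.
import Mathlib
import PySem

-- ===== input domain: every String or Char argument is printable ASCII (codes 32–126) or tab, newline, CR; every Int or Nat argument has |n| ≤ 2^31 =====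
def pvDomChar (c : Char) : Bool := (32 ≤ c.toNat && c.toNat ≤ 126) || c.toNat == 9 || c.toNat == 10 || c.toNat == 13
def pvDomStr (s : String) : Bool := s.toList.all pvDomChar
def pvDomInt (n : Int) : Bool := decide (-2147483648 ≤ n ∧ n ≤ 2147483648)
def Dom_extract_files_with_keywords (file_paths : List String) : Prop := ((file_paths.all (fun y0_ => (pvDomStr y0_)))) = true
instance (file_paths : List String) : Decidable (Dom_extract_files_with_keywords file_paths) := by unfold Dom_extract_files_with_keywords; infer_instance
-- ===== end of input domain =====

-- B scans the list backwards, fills each slot on its first hit and breaks once both are set;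
-- same return value as A's full forward overwriting pass (no mutation involved).
-- ===== PORT A =====
def extract_files_with_keywords (file_paths : List String) : Option String × Option String :=
  file_paths.foldl
    (fun st file_path =>
      if PySem.Str.isIn "r1.fastq.gz" (PySem.Str.lower file_path) then (some file_path, st.2)
      else if PySem.Str.isIn "r2.fastq.gz" (PySem.Str.lower file_path) then (st.1, some file_path)
      else st)
    (none, none)

-- ===== PORT B =====
-- the reversed-scan loop with early break
def pvGoB : List String → Option String → Option String → Option String × Option String
  | [], file1, file2 => (file1, file2)
  | file_path :: rest, file1, file2 =>
    let low := PySem.Str.lower file_path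
    let st :=
      if PySem.Str.isIn "r1.fastq.gz" low then
        (if file1 = none then some file_path else file1, file2)
      else if PySem.Str.isIn "r2.fastq.gz" low then
        (file1, if file2 = none then some file_path else file2)
      else (file1, file2)
    if st.1.isSome && st.2.isSome then st else pvGoB rest st.1 st.2

def extract_files_with_keywords_alt (file_paths : List String) : Option String × Option String :=
  pvGoB file_paths.reverse none none

-- ===== PRECONDITION & SPEC =====
def Spec_extract_files_with_keywords (file_paths : List String) (out : Option String × Option String) : Prop := out = extract_files_with_keywords_alt file_paths
instance (file_paths : List String) (out : Option String × Option String) : Decidable (Spec_extract_files_with_keywords file_paths out) := by unfold Spec_extract_files_with_keywords; infer_instance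

-- ===== CLAIM (what is proved, stated in full; the proofs are below) =====
def Claim_equal_extract_files_with_keywords : Prop := ∀ (file_paths : List String), Dom_extract_files_with_keywords file_paths → Spec_extract_files_with_keywords file_paths (extract_files_with_keywords file_paths)

-- ===== LEMMAS AND PROOFS =====
-- path predicates: contains "r1.fastq.gz"; contains "r2.fastq.gz" but not "r1.fastq.gz"
def pvHasR1 (p : String) : Bool := PySem.Str.isIn "r1.fastq.gz" (PySem.Str.lower p)
def pvHasR2o (p : String) : Bool :=
  !PySem.Str.isIn "r1.fastq.gz" (PySem.Str.lower p) && PySem.Str.isIn "r2.fastq.gz" (PySem.Str.lower p)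

theorem pvGoB_eq (ps : List String) (f1 f2 : Option String) :
    pvGoB ps f1 f2 = (f1.or (ps.find? pvHasR1), f2.or (ps.find? pvHasR2o)) := by
  induction ps generalizing f1 f2 with
  | nil => simp [pvGoB]
  | cons p rest ih =>
    simp only [pvGoB, List.find?]
    by_cases h1 : PySem.Str.isIn "r1.fastq.gz" (PySem.Str.lower p) = true
    · have hp1 : pvHasR1 p = true := h1
      have hp2 : pvHasR2o p = false := by unfold pvHasR2o; rw [h1]; rfl
      simp only [h1, if_true, hp1, hp2]
      cases f1 <;> cases f2 <;> simp [ih, Option.or]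
    · rw [Bool.not_eq_true] at h1
      have hp1 : pvHasR1 p = false := h1
      simp only [h1, Bool.false_eq_true, if_false, hp1]
      by_cases h2 : PySem.Str.isIn "r2.fastq.gz" (PySem.Str.lower p) = true
      · have hp2 : pvHasR2o p = true := by unfold pvHasR2o; rw [h1, h2]; rfl
        simp only [h2, if_true, hp2]
        cases f1 <;> cases f2 <;> simp [ih, Option.or]
      · rw [Bool.not_eq_true] at h2
        have hp2 : pvHasR2o p = false := by unfold pvHasR2o; rw [h1, h2]; rfl
        simp only [h2, Bool.false_eq_true, if_false, hp2]
        cases f1 <;> cases f2 <;> simp [ih, Option.or]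

theorem foldlA_eq (ps : List String) (f1 f2 : Option String) :
    ps.foldl
      (fun st file_path =>
        if PySem.Str.isIn "r1.fastq.gz" (PySem.Str.lower file_path) then (some file_path, st.2)
        else if PySem.Str.isIn "r2.fastq.gz" (PySem.Str.lower file_path) then (st.1, some file_path)
        else st)
      (f1, f2)
    = ((ps.reverse.find? pvHasR1).or f1, (ps.reverse.find? pvHasR2o).or f2) := by
  induction ps generalizing f1 f2 with
  | nil => simp
  | cons p rest ih =>
    simp only [List.foldl, List.reverse_cons, List.find?_append]
    by_cases h1 : PySem.Str.isIn "r1.fastq.gz" (PySem.Str.lower p) = true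
    · have hp1 : pvHasR1 p = true := h1
      have hp2 : pvHasR2o p = false := by unfold pvHasR2o; rw [h1]; rfl
      simp only [h1, if_true, ih]
      simp [List.find?, hp1, hp2]
    · rw [Bool.not_eq_true] at h1
      have hp1 : pvHasR1 p = false := h1
      by_cases h2 : PySem.Str.isIn "r2.fastq.gz" (PySem.Str.lower p) = true
      · have hp2 : pvHasR2o p = true := by unfold pvHasR2o; rw [h1, h2]; rfl
        simp only [h1, Bool.false_eq_true, if_false, h2, if_true, ih]
        simp [List.find?, hp1, hp2]
      · rw [Bool.not_eq_true] at h2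
        have hp2 : pvHasR2o p = false := by unfold pvHasR2o; rw [h1, h2]; rfl
        simp only [h1, Bool.false_eq_true, if_false, h2, ih]
        simp [List.find?, hp1, hp2]

-- ===== VERDICT (by name: the statement is the Claim_ definition above) =====
theorem extract_files_with_keywords_spec : Claim_equal_extract_files_with_keywords := by
  intro file_paths _
  show extract_files_with_keywords file_paths = extract_files_with_keywords_alt file_paths
  rw [extract_files_with_keywords, extract_files_with_keywords_alt, foldlA_eq, pvGoB_eq]
  simp
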